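-- pv_equiv track=rewrite | github.com/RelativelyBigMan/chessbot | main.py | check_valid_king
-- ===== SOURCE A (Python) =====
-- def check_valid_king(x1,y1,x2,y2):
--     possibleMoves = []
--     deltas = [(-1,1),(0,1),(1,1),(1,0),(-1,0),(-1,-1),(0,-1),(1,-1)]
--     for delta in deltas:
--         deltaX,deltaY = delta[0], delta[1]
--         possibleMoves.append((deltaX+x1,deltaY+y1))
--     if (x2,y2) in possibleMoves:
--         return True
--     return False
-- ===== SOURCE B (Python) =====
-- def check_valid_king(x1, y1, x2, y2):
--     dx = x2 - x1
--     dy = y2 - y1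
--     return dx in (-1, 0, 1) and dy in (-1, 0, 1) and (dx, dy) != (0, 0)
-- ===== Notes on version B (the rewrite author's own statement) =====
-- stated objective: simpler
-- what changed: Replaces building a list of 8 candidate squares and a membership scan with a closed-form arithmetic check on the coordinate differences.
import Mathlib
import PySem

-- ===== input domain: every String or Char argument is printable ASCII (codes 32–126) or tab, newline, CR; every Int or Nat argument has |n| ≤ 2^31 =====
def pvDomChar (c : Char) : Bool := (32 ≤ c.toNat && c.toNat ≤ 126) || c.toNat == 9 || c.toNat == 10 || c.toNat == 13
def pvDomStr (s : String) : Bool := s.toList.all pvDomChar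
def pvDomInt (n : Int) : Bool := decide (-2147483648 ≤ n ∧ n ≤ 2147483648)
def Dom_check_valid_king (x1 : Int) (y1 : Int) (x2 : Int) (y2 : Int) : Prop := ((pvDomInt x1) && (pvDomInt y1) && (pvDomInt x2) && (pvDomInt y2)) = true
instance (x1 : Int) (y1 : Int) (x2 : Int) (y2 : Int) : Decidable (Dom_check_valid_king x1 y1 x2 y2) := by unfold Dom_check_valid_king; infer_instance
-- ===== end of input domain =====

-- B replaces A's 8-candidate list build and membership scan with a closed-form check on the coordinate differences (objective: simpler).

-- ===== PORT A =====
def check_valid_king (x1 : Int) (y1 : Int) (x2 : Int) (y2 : Int) : Bool :=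
  let deltas : List (Int × Int) := [(-1,1),(0,1),(1,1),(1,0),(-1,0),(-1,-1),(0,-1),(1,-1)]
  let possibleMoves : List (Int × Int) :=
    deltas.foldl (fun acc delta => acc ++ [(delta.1 + x1, delta.2 + y1)]) []
  if (x2, y2) ∈ possibleMoves then true else false

-- ===== PORT B =====
def check_valid_king_alt (x1 : Int) (y1 : Int) (x2 : Int) (y2 : Int) : Bool :=
  let dx := x2 - x1
  let dy := y2 - y1
  (dx == -1 || dx == 0 || dx == 1) && (dy == -1 || dy == 0 || dy == 1) &&
    !((dx, dy) == ((0 : Int), (0 : Int)))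

-- ===== PRECONDITION & SPEC =====
def Spec_check_valid_king (x1 : Int) (y1 : Int) (x2 : Int) (y2 : Int) (out : Bool) : Prop := out = check_valid_king_alt x1 y1 x2 y2
instance (x1 : Int) (y1 : Int) (x2 : Int) (y2 : Int) (out : Bool) : Decidable (Spec_check_valid_king x1 y1 x2 y2 out) := by unfold Spec_check_valid_king; infer_instance

-- ===== CLAIM (what is proved, stated in full; the proofs are below) =====
def Claim_equal_check_valid_king : Prop := ∀ (x1 : Int) (y1 : Int) (x2 : Int) (y2 : Int), Dom_check_valid_king x1 y1 x2 y2 → Spec_check_valid_king x1 y1 x2 y2 (check_valid_king x1 y1 x2 y2)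

-- ===== LEMMAS AND PROOFS =====

-- ===== VERDICT (by name: the statement is the Claim_ definition above) =====
theorem check_valid_king_spec : Claim_equal_check_valid_king := by
  intro x1 y1 x2 y2 _
  unfold Spec_check_valid_king check_valid_king check_valid_king_alt
  simp only [List.foldl, List.mem_append, List.mem_singleton, List.not_mem_nil, false_or,
    Prod.ext_iff]
  split_ifs with h
  · symm
    simp only [Bool.and_eq_true, Bool.or_eq_true, beq_iff_eq, Bool.not_eq_true',
      Prod.mk.injEq, beq_eq_false_iff_ne, ne_eq, not_and] at *
    omega
  · symm
    rw [Bool.eq_false_iff]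
    simp only [ne_eq, Bool.and_eq_true, Bool.or_eq_true, beq_iff_eq, Bool.not_eq_true',
      Prod.mk.injEq, beq_eq_false_iff_ne, not_and] at *
    omega
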